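-- pv_equiv track=rewrite | github.com/sharathkumar49/learning | Python programs/LeetCodeSolutions/1902.DepthofBSTGivenInsertionOrder.py | bstDepth
-- ===== SOURCE A (Python) =====
-- def bstDepth(order):
--     import bisect
--     arr = []
--     depth = {}
--     for x in order:
--         i = bisect.bisect_left(arr, x)
--         left = arr[i-1] if i > 0 else None
--         right = arr[i] if i < len(arr) else None
--         d = 1 + max(depth.get(left, 0), depth.get(right, 0))
--         depth[x] = d
--         arr.insert(i, x)
--     return max(depth.values())
-- ===== SOURCE B (Python) =====
-- def bstDepth(order):
--     # Direct neighbour scan over the already-inserted keys: no sorted array, no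
--     # bisect, no list.insert; pred = largest key < x, succ = smallest key >= x
--     # (bisect_left's right neighbour), and a running maximum of the depths.
--     depth = {}
--     best = 0
--     for x in order:
--         pred = None
--         succ = None
--         for y in depth:
--             if y < x:
--                 if pred is None or pred < y:
--                     pred = y
--             elif succ is None or y < succ:
--                 succ = y
--         d = 1 + max(depth[pred] if pred is not None else 0,
--                     depth[succ] if succ is not None else 0)
--         depth[x] = d
--         if best < d:
--             best = d
--     return best
-- ===== Notes on version B (the rewrite author's own statement) =====
-- stated objective: alternative
-- what changed: B drops A's sorted array + bisect + list.insert machinery entirely: it finds each key's neighbours (largest seen key < x, smallest seen key >= x) by a direct linear scan over the dict of already-inserted keys and keeps a running maximum instead of taking max over the dict at the end.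
-- outside the precondition, e.g. on bstDepth([]): A raises ValueError, B returns 0
import Mathlib
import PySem

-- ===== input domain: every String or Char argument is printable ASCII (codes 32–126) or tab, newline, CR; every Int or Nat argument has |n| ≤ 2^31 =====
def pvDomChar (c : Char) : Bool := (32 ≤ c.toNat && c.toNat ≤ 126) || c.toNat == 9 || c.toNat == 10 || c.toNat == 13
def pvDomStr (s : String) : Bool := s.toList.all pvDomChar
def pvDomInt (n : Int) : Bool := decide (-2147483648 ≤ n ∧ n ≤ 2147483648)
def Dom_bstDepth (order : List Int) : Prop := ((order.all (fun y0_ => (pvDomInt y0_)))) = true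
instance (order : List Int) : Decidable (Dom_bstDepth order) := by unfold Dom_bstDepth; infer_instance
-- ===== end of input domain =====

-- B replaces A's sorted-array/bisect predecessor-successor lookup by a direct linear
-- scan of the inserted keys plus a running maximum (objective: alternative, not faster).

-- ===== PORT A =====
-- loop body of A's 'for x in order', state = (arr, depth)
def bstDepthStep (st : List Int × PySem.Dict Int Int) (x : Int) : List Int × PySem.Dict Int Int :=
  let arr := st.1
  let depth := st.2
  let i := PySem.List.bisectLeft arr x            -- bisect.bisect_left(arr, x)
  let left : Option Int := if 0 < i then arr[i-1]? else none   -- in range whenever reached (i ≤ len arr)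
  let right : Option Int := if i < arr.length then arr[i]? else none
  let d : Int := 1 + max ((left.map (fun v => depth.getD v 0)).getD 0)
                         ((right.map (fun v => depth.getD v 0)).getD 0)
  (PySem.List.insert arr (i : Int) x, depth.insert x d)

def bstDepth (order : List Int) : Int :=
  let st := order.foldl bstDepthStep ([], PySem.Dict.empty)
  match PySem.List.max? st.2.values (fun v => v) with
  | some m => m
  | none => 0   -- Python A raises ValueError here (max of empty dict); excluded by Pre_

-- ===== PORT B =====
-- body of B's inner 'for y in depth' loop, state = (pred, succ)
def predSuccStep (x : Int) (ps : Option Int × Option Int) (y : Int) : Option Int × Option Int :=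
  if y < x then
    (match ps.1 with | none => some y | some p => if p < y then some y else some p, ps.2)
  else
    (ps.1, match ps.2 with | none => some y | some s => if y < s then some y else some s)

-- body of B's outer loop, state = (depth, best)
def bstDepthAltStep (st : PySem.Dict Int Int × Int) (x : Int) : PySem.Dict Int Int × Int :=
  let depth := st.1
  let best := st.2
  let ps := depth.keys.foldl (predSuccStep x) (none, none)
  let d : Int := 1 + max ((ps.1.map (fun p => depth.getD p 0)).getD 0)
                         ((ps.2.map (fun s => depth.getD s 0)).getD 0)
  (depth.insert x d, if best < d then d else best)

def bstDepth_alt (order : List Int) : Int :=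
  (order.foldl bstDepthAltStep (PySem.Dict.empty, 0)).2

-- ===== PRECONDITION & SPEC =====
-- Pre_ excludes only the empty list, on which A raises ValueError (max() of an
-- empty sequence); B returns 0 there.
def Pre_bstDepth (order : List Int) : Prop := order ≠ []
instance (order : List Int) : Decidable (Pre_bstDepth order) := by unfold Pre_bstDepth; infer_instance
def pvWitness_bstDepth : List Int := [2, 1, 4, 3]

def Spec_bstDepth (order : List Int) (out : Int) : Prop := out = bstDepth_alt order
instance (order : List Int) (out : Int) : Decidable (Spec_bstDepth order out) := by unfold Spec_bstDepth; infer_instance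

-- ===== CLAIM (what is proved, stated in full; the proofs are below) =====
def Claim_equal_bstDepth : Prop := ∀ (order : List Int), Dom_bstDepth order → Pre_bstDepth order → Spec_bstDepth order (bstDepth order)

-- ===== LEMMAS AND PROOFS =====

-- B's inner pair-loop splits into two independent one-component folds.
def predUpd (x : Int) (p : Option Int) (y : Int) : Option Int :=
  if y < x then (match p with | none => some y | some q => if q < y then some y else some q) else p

def succUpd (x : Int) (s : Option Int) (y : Int) : Option Int :=
  if y < x then s
  else (match s with | none => some y | some q => if y < q then some y else some q)

lemma predSuccStep_eq (x : Int) (ps : Option Int × Option Int) (y : Int) :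
    predSuccStep x ps y = (predUpd x ps.1 y, succUpd x ps.2 y) := by
  unfold predSuccStep predUpd succUpd
  split_ifs <;> rfl

lemma foldl_predSuccStep_split (x : Int) (keys : List Int) : ∀ (p0 s0 : Option Int),
    keys.foldl (predSuccStep x) (p0, s0) = (keys.foldl (predUpd x) p0, keys.foldl (succUpd x) s0) := by
  induction keys with
  | nil => intro p0 s0; rfl
  | cons y t ih =>
      intro p0 s0
      simp only [List.foldl_cons, predSuccStep_eq, ih]

lemma predUpd_some (x : Int) (p0 : Option Int) (y q : Int)
    (h : predUpd x p0 y = some q) : (q = y ∧ y < x) ∨ p0 = some q := by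
  unfold predUpd at h
  split_ifs at h with hy
  · cases p0 with
    | none => simp at h; exact Or.inl ⟨h.symm, hy⟩
    | some p =>
        simp only [] at h
        split_ifs at h with h2 <;> simp at h
        · exact Or.inl ⟨h.symm, hy⟩
        · exact Or.inr (by rw [h])
  · exact Or.inr h

lemma predUpd_lt (x : Int) (p0 : Option Int) (y : Int) (hy : y < x) :
    ∃ q, predUpd x p0 y = some q ∧ y ≤ q := by
  unfold predUpd
  cases p0 with
  | none => exact ⟨y, by simp [hy], le_refl y⟩
  | some p =>
      simp only [if_pos hy]
      by_cases h2 : p < y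
      · exact ⟨y, by simp [h2], le_refl y⟩
      · exact ⟨p, by simp [h2], by omega⟩

lemma predUpd_mono (x : Int) (p0 : Option Int) (y p : Int) (hp : p0 = some p) :
    ∃ q, predUpd x p0 y = some q ∧ p ≤ q := by
  subst hp
  unfold predUpd
  split_ifs with hy
  · by_cases h2 : p < y
    · exact ⟨y, by simp [h2], by omega⟩
    · exact ⟨p, by simp [h2], le_refl p⟩
  · exact ⟨p, rfl, le_refl p⟩

-- characterisation of the pred-scan fold
lemma maxLt_spec (x : Int) (keys : List Int) : ∀ (p0 : Option Int),
    (∀ q, keys.foldl (predUpd x) p0 = some q → ((q ∈ keys ∧ q < x) ∨ p0 = some q)) ∧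
    (∀ y ∈ keys, y < x → ∃ q, keys.foldl (predUpd x) p0 = some q ∧ y ≤ q) ∧
    (∀ p, p0 = some p → ∃ q, keys.foldl (predUpd x) p0 = some q ∧ p ≤ q) := by
  induction keys with
  | nil =>
      intro p0
      refine ⟨fun q h => Or.inr h, by simp, fun p hp => ⟨p, by simpa using hp, le_refl p⟩⟩
  | cons y t ih =>
      intro p0
      obtain ⟨ih1, ih2, ih3⟩ := ih (predUpd x p0 y)
      simp only [List.foldl_cons]
      refine ⟨?_, ?_, ?_⟩
      · intro q h
        rcases ih1 q h with ⟨hq, hlt⟩ | h1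
        · exact Or.inl ⟨List.mem_cons_of_mem _ hq, hlt⟩
        · rcases predUpd_some x p0 y q h1 with ⟨rfl, hlt⟩ | h2
          · exact Or.inl ⟨List.mem_cons_self, hlt⟩
          · exact Or.inr h2
      · intro z hz hzx
        rcases List.mem_cons.mp hz with rfl | hz
        · obtain ⟨q, hq, hle⟩ := predUpd_lt x p0 z hzx
          obtain ⟨r, hr, hle2⟩ := ih3 q hq
          exact ⟨r, hr, by omega⟩
        · exact ih2 z hz hzx
      · intro p hp
        obtain ⟨q, hq, hle⟩ := predUpd_mono x p0 y p hp
        obtain ⟨r, hr, hle2⟩ := ih3 q hq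
        exact ⟨r, hr, by omega⟩

lemma succUpd_some (x : Int) (s0 : Option Int) (y q : Int)
    (h : succUpd x s0 y = some q) : (q = y ∧ x ≤ q) ∨ s0 = some q := by
  unfold succUpd at h
  split_ifs at h with hy
  · exact Or.inr h
  · cases s0 with
    | none => simp at h; exact Or.inl ⟨h.symm, by omega⟩
    | some s =>
        simp only [] at h
        split_ifs at h with h2 <;> simp at h
        · exact Or.inl ⟨h.symm, by omega⟩
        · exact Or.inr (by rw [h])

lemma succUpd_ge (x : Int) (s0 : Option Int) (y : Int) (hy : x ≤ y) :
    ∃ q, succUpd x s0 y = some q ∧ q ≤ y := by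
  unfold succUpd
  have hxy : ¬ y < x := by omega
  cases s0 with
  | none => exact ⟨y, by simp [hxy], le_refl y⟩
  | some s =>
      simp only [if_neg hxy]
      by_cases h2 : y < s
      · exact ⟨y, by simp [h2], le_refl y⟩
      · exact ⟨s, by simp [h2], by omega⟩

lemma succUpd_mono (x : Int) (s0 : Option Int) (y s : Int) (hs : s0 = some s) :
    ∃ q, succUpd x s0 y = some q ∧ q ≤ s := by
  subst hs
  unfold succUpd
  split_ifs with hy
  · exact ⟨s, rfl, le_refl s⟩
  · by_cases h2 : y < s
    · exact ⟨y, by simp [h2], by omega⟩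
    · exact ⟨s, by simp [h2], le_refl s⟩

-- characterisation of the succ-scan fold
lemma minGt_spec (x : Int) (keys : List Int) : ∀ (s0 : Option Int),
    (∀ q, keys.foldl (succUpd x) s0 = some q → ((q ∈ keys ∧ x ≤ q) ∨ s0 = some q)) ∧
    (∀ y ∈ keys, x ≤ y → ∃ q, keys.foldl (succUpd x) s0 = some q ∧ q ≤ y) ∧
    (∀ s, s0 = some s → ∃ q, keys.foldl (succUpd x) s0 = some q ∧ q ≤ s) := by
  induction keys with
  | nil =>
      intro s0
      refine ⟨fun q h => Or.inr h, by simp, fun s hs => ⟨s, by simpa using hs, le_refl s⟩⟩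
  | cons y t ih =>
      intro s0
      obtain ⟨ih1, ih2, ih3⟩ := ih (succUpd x s0 y)
      simp only [List.foldl_cons]
      refine ⟨?_, ?_, ?_⟩
      · intro q h
        rcases ih1 q h with ⟨hq, hlt⟩ | h1
        · exact Or.inl ⟨List.mem_cons_of_mem _ hq, hlt⟩
        · rcases succUpd_some x s0 y q h1 with ⟨rfl, hlt⟩ | h2
          · exact Or.inl ⟨List.mem_cons_self, hlt⟩
          · exact Or.inr h2
      · intro z hz hzx
        rcases List.mem_cons.mp hz with rfl | hz
        · obtain ⟨q, hq, hle⟩ := succUpd_ge x s0 z hzx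
          obtain ⟨r, hr, hle2⟩ := ih3 q hq
          exact ⟨r, hr, by omega⟩
        · exact ih2 z hz hzx
      · intro s hs
        obtain ⟨q, hq, hle⟩ := succUpd_mono x s0 y s hs
        obtain ⟨r, hr, hle2⟩ := ih3 q hq
        exact ⟨r, hr, by omega⟩

-- two options both describing "the greatest element < x" of equal sets are equal
lemma opt_pred_unique (S T : List Int) (hmem : ∀ y, y ∈ S ↔ y ∈ T) (x : Int)
    (pa pb : Option Int)
    (h1 : ∀ q, pa = some q → q ∈ S ∧ q < x)
    (h2 : ∀ y ∈ S, y < x → ∃ q, pa = some q ∧ y ≤ q)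
    (g1 : ∀ q, pb = some q → q ∈ T ∧ q < x)
    (g2 : ∀ y ∈ T, y < x → ∃ q, pb = some q ∧ y ≤ q) : pa = pb := by
  cases pa with
  | none =>
      cases pb with
      | none => rfl
      | some q =>
          obtain ⟨hqT, hqx⟩ := g1 q rfl
          obtain ⟨r, hr, _⟩ := h2 q ((hmem q).mpr hqT) hqx
          exact absurd hr (by simp)
  | some p =>
      obtain ⟨hpS, hpx⟩ := h1 p rfl
      obtain ⟨q, hq, hpq⟩ := g2 p ((hmem p).mp hpS) hpx
      rw [hq]
      obtain ⟨hqT, hqx⟩ := g1 q hq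
      obtain ⟨r, hr, hqr⟩ := h2 q ((hmem q).mpr hqT) hqx
      have hrp : p = r := Option.some.inj hr
      have : p = q := by omega
      rw [this]

lemma opt_succ_unique (S T : List Int) (hmem : ∀ y, y ∈ S ↔ y ∈ T) (x : Int)
    (pa pb : Option Int)
    (h1 : ∀ q, pa = some q → q ∈ S ∧ x ≤ q)
    (h2 : ∀ y ∈ S, x ≤ y → ∃ q, pa = some q ∧ q ≤ y)
    (g1 : ∀ q, pb = some q → q ∈ T ∧ x ≤ q)
    (g2 : ∀ y ∈ T, x ≤ y → ∃ q, pb = some q ∧ q ≤ y) : pa = pb := by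
  cases pa with
  | none =>
      cases pb with
      | none => rfl
      | some q =>
          obtain ⟨hqT, hqx⟩ := g1 q rfl
          obtain ⟨r, hr, _⟩ := h2 q ((hmem q).mpr hqT) hqx
          exact absurd hr (by simp)
  | some p =>
      obtain ⟨hpS, hpx⟩ := h1 p rfl
      obtain ⟨q, hq, hpq⟩ := g2 p ((hmem p).mp hpS) hpx
      rw [hq]
      obtain ⟨hqT, hqx⟩ := g1 q hq
      obtain ⟨r, hr, hqr⟩ := h2 q ((hmem q).mpr hqT) hqx
      have hrp : p = r := Option.some.inj hr
      have : p = q := by omega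
      rw [this]

-- A-side: the bisect left neighbour is the greatest element < x
lemma left_spec (arr : List Int) (x : Int) (hs : arr.Pairwise (· ≤ ·)) :
    (∀ q, (if 0 < PySem.List.bisectLeft arr x then arr[PySem.List.bisectLeft arr x - 1]? else none) = some q → q ∈ arr ∧ q < x) ∧
    (∀ y ∈ arr, y < x → ∃ q, (if 0 < PySem.List.bisectLeft arr x then arr[PySem.List.bisectLeft arr x - 1]? else none) = some q ∧ y ≤ q) := by
  obtain ⟨hlen, hlt, hge⟩ := PySem.List.bisectLeft_spec arr x hs
  set i := PySem.List.bisectLeft arr x with hi_def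
  by_cases hi : 0 < i
  · have h' : i - 1 < arr.length := by omega
    rw [if_pos hi, List.getElem?_eq_getElem h']
    constructor
    · intro q hq
      have hq' : arr[i-1] = q := by injection hq
      subst hq'
      exact ⟨List.getElem_mem h', hlt (i-1) h' (by omega)⟩
    · intro y hy hyx
      obtain ⟨j, hj, rfl⟩ := List.mem_iff_getElem.mp hy
      have hji : j < i := by
        by_contra hc
        have := hge j hj (by omega)
        omega
      refine ⟨arr[i-1], rfl, ?_⟩
      rcases Nat.lt_or_ge j (i-1) with hcase | hcase
      · exact (List.pairwise_iff_getElem.mp hs) j (i-1) hj h' hcase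
      · have : j = i - 1 := by omega
        subst this
        exact le_refl _
  · rw [if_neg hi]
    constructor
    · intro q hq; exact absurd hq (by simp)
    · intro y hy hyx
      obtain ⟨j, hj, rfl⟩ := List.mem_iff_getElem.mp hy
      have := hge j hj (by omega)
      omega

-- A-side: the bisect right neighbour is the least element ≥ x
lemma right_spec (arr : List Int) (x : Int) (hs : arr.Pairwise (· ≤ ·)) :
    (∀ q, (if PySem.List.bisectLeft arr x < arr.length then arr[PySem.List.bisectLeft arr x]? else none) = some q → q ∈ arr ∧ x ≤ q) ∧
    (∀ y ∈ arr, x ≤ y → ∃ q, (if PySem.List.bisectLeft arr x < arr.length then arr[PySem.List.bisectLeft arr x]? else none) = some q ∧ q ≤ y) := by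
  obtain ⟨hlen, hlt, hge⟩ := PySem.List.bisectLeft_spec arr x hs
  set i := PySem.List.bisectLeft arr x with hi_def
  constructor
  · intro q hq
    by_cases hi : i < arr.length
    · rw [if_pos hi, List.getElem?_eq_getElem hi] at hq
      have hq' : arr[i] = q := by injection hq
      subst hq'
      exact ⟨List.getElem_mem hi, hge i hi (le_refl i)⟩
    · rw [if_neg hi] at hq; exact absurd hq (by simp)
  · intro y hy hxy
    obtain ⟨j, hj, rfl⟩ := List.mem_iff_getElem.mp hy
    have hij : i ≤ j := by
      by_contra hc
      have := hlt j hj (by omega)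
      omega
    have hi : i < arr.length := by omega
    rw [if_pos hi, List.getElem?_eq_getElem hi]
    refine ⟨arr[i], rfl, ?_⟩
    rcases Nat.lt_or_ge i j with hcase | hcase
    · exact (List.pairwise_iff_getElem.mp hs) i j hi hj hcase
    · have : i = j := by omega
      subst this
      exact le_refl _

-- inserting x at its bisect position keeps the array sorted
lemma insert_keeps_sorted (arr : List Int) (x : Int) (hs : arr.Pairwise (· ≤ ·)) :
    (PySem.List.insert arr ((PySem.List.bisectLeft arr x : Nat) : Int) x).Pairwise (· ≤ ·) ∧
    (∀ y, y ∈ PySem.List.insert arr ((PySem.List.bisectLeft arr x : Nat) : Int) x ↔ y = x ∨ y ∈ arr) := by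
  obtain ⟨hlen, hlt, hge⟩ := PySem.List.bisectLeft_spec arr x hs
  set i := PySem.List.bisectLeft arr x with hi_def
  rw [PySem.List.insert_natCast arr i x hlen]
  have htake : ∀ a ∈ arr.take i, a ≤ x := by
    intro a ha
    obtain ⟨j, hj, rfl⟩ := List.mem_iff_getElem.mp ha
    have hj2 : j < i ∧ j < arr.length := by
      simp only [List.length_take] at hj
      omega
    rw [List.getElem_take]
    exact le_of_lt (hlt j hj2.2 hj2.1)
  have hdrop : ∀ b ∈ arr.drop i, x ≤ b := by
    intro b hb
    obtain ⟨k, hk, rfl⟩ := List.mem_iff_getElem.mp hb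
    rw [List.getElem_drop]
    have hk' : i + k < arr.length := by simp at hk; omega
    exact hge (i + k) hk' (by omega)
  constructor
  · rw [List.pairwise_append]
    refine ⟨hs.sublist (List.take_sublist i arr), ?_, ?_⟩
    · rw [List.pairwise_cons]
      exact ⟨hdrop, hs.sublist (List.drop_sublist i arr)⟩
    · intro a ha b hb
      rcases List.mem_cons.mp hb with rfl | hb
      · exact htake a ha
      · exact le_trans (htake a ha) (hdrop b hb)
  · intro y
    have hsplit : y ∈ arr ↔ y ∈ arr.take i ∨ y ∈ arr.drop i := by
      conv_lhs => rw [← List.take_append_drop i arr]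
      exact List.mem_append
    simp only [List.mem_append, List.mem_cons, hsplit]
    tauto

-- running-max helpers
lemma foldl_max_init_le (l : List Int) : ∀ a : Int, a ≤ l.foldl max a := by
  induction l with
  | nil => intro a; simp
  | cons y t ih =>
      intro a
      simp only [List.foldl_cons]
      exact le_trans (le_max_left a y) (ih (max a y))

lemma le_foldl_max_of_mem (l : List Int) (v : Int) (hv : v ∈ l) : ∀ a : Int, v ≤ l.foldl max a := by
  induction l with
  | nil => cases hv
  | cons y t ih =>
      intro a
      simp only [List.foldl_cons]
      rcases List.mem_cons.mp hv with rfl | hv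
      · exact le_trans (le_max_right a v) (foldl_max_init_le t (max a v))
      · exact ih hv (max a y)

lemma foldl_max_le (l : List Int) : ∀ a c : Int, a ≤ c → (∀ v ∈ l, v ≤ c) → l.foldl max a ≤ c := by
  induction l with
  | nil => intro a c hac _; simpa using hac
  | cons y t ih =>
      intro a c hac hall
      simp only [List.foldl_cons]
      exact ih (max a y) c (max_le hac (hall y List.mem_cons_self)) (fun v hv => hall v (List.mem_cons_of_mem _ hv))

-- inserting a key whose old value (if any) is ≤ d pushes the running max to max … d
lemma max_values_insert (depth : PySem.Dict Int Int) (x d : Int)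
    (hnd : depth.keys.Nodup) (hxd : x ∈ depth.keys → depth.getD x 0 ≤ d) :
    (depth.insert x d).values.foldl max 0 = max (depth.values.foldl max 0) d := by
  have hnd' : (depth.insert x d).keys.Nodup := PySem.Dict.nodup_keys_insert depth x d hnd
  have hvm : (depth.insert x d).values = (depth.insert x d).keys.map (fun k => (depth.insert x d).getD k 0) :=
    PySem.Dict.values_eq_map_keys _ hnd' 0
  have hvo : depth.values = depth.keys.map (fun k => depth.getD k 0) :=
    PySem.Dict.values_eq_map_keys depth hnd 0
  have hdmem : d ∈ (depth.insert x d).values := by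
    rw [hvm]
    have hx' : x ∈ (depth.insert x d).keys := (PySem.Dict.mem_keys_insert depth x x d).mpr (Or.inl rfl)
    refine List.mem_map.mpr ⟨x, hx', ?_⟩
    rw [PySem.Dict.getD_insert]
    simp
  apply le_antisymm
  · apply foldl_max_le _ 0 _ (le_trans (foldl_max_init_le depth.values 0) (le_max_left _ d))
    intro v hv
    rw [hvm] at hv
    obtain ⟨k, hk, rfl⟩ := List.mem_map.mp hv
    rw [PySem.Dict.getD_insert]
    by_cases hkx : k = x
    · simp only [if_pos hkx]
      exact le_max_right _ d
    · simp only [if_neg hkx]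
      have hkk : k ∈ depth.keys := ((PySem.Dict.mem_keys_insert depth x k d).mp hk).resolve_left hkx
      have : depth.getD k 0 ∈ depth.values := by
        rw [hvo]; exact List.mem_map_of_mem hkk
      exact le_trans (le_foldl_max_of_mem _ _ this 0) (le_max_left _ d)
  · apply max_le
    · apply foldl_max_le _ 0 _ (foldl_max_init_le _ 0)
      intro v hv
      rw [hvo] at hv
      obtain ⟨k, hk, rfl⟩ := List.mem_map.mp hv
      by_cases hkx : k = x
      · subst hkx
        exact le_trans (hxd hk) (le_foldl_max_of_mem _ _ hdmem 0)
      · have hk' : k ∈ (depth.insert x d).keys := (PySem.Dict.mem_keys_insert depth x k d).mpr (Or.inr hk)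
        have : depth.getD k 0 ∈ (depth.insert x d).values := by
          rw [hvm]
          refine List.mem_map.mpr ⟨k, hk', ?_⟩
          rw [PySem.Dict.getD_insert, if_neg hkx]
        exact le_foldl_max_of_mem _ _ this 0
    · exact le_foldl_max_of_mem _ _ hdmem 0

-- main loop invariant
lemma main_inv (rest : List Int) : ∀ (arr : List Int) (depth : PySem.Dict Int Int) (best : Int),
    arr.Pairwise (· ≤ ·) →
    depth.keys.Nodup →
    (∀ y, y ∈ arr ↔ y ∈ depth.keys) →
    best = depth.values.foldl max 0 →
    (∀ v ∈ depth.values, 1 ≤ v) →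
    (match PySem.List.max? (rest.foldl bstDepthStep (arr, depth)).2.values (fun v => v) with
     | some m => m
     | none => 0)
    = (rest.foldl bstDepthAltStep (depth, best)).2 := by
  induction rest with
  | nil =>
      intro arr depth best _ _ _ hbest hpos
      simp only [List.foldl_nil]
      cases hv : depth.values with
      | nil =>
          rw [hv] at hbest
          simp [PySem.List.max?, hbest]
      | cons v t =>
          rw [hv] at hbest hpos
          rw [PySem.List.max?_id_cons]
          have h1 : (1 : Int) ≤ v := hpos v List.mem_cons_self
          have : max 0 v = v := by omega
          simp only [List.foldl_cons, this] at hbest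
          simp [hbest]
  | cons x rest' ih =>
      intro arr depth best hsort hnd hmemiff hbest hpos
      -- the two neighbour computations agree
      set i := PySem.List.bisectLeft arr x with hi_def
      set pfold := depth.keys.foldl (predUpd x) none with hp_def
      set sfold := depth.keys.foldl (succUpd x) none with hs_def
      obtain ⟨m1, m2, _⟩ := maxLt_spec x depth.keys none
      obtain ⟨n1, n2, _⟩ := minGt_spec x depth.keys none
      obtain ⟨la, lb⟩ := left_spec arr x hsort
      obtain ⟨ra, rb⟩ := right_spec arr x hsort
      have hL : (if 0 < i then arr[i-1]? else none) = pfold :=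
        opt_pred_unique arr depth.keys hmemiff x _ _ la lb
          (fun q h => (m1 q h).resolve_right (by simp)) (fun y hy hyx => m2 y hy hyx)
      have hR : (if i < arr.length then arr[i]? else none) = sfold :=
        opt_succ_unique arr depth.keys hmemiff x _ _ ra rb
          (fun q h => (n1 q h).resolve_right (by simp)) (fun y hy hyx => n2 y hy hyx)
      clear_value pfold sfold
      obtain ⟨d, hd_def⟩ : ∃ d : Int,
          d = 1 + max ((pfold.map (fun v => depth.getD v 0)).getD 0)
                      ((sfold.map (fun v => depth.getD v 0)).getD 0) := ⟨_, rfl⟩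
      have hA : bstDepthStep (arr, depth) x
          = (PySem.List.insert arr ((i : Nat) : Int) x, depth.insert x d) := by
        simp only [bstDepthStep, ← hi_def, hL, hR]
        rw [← hd_def]
      have hB : bstDepthAltStep (depth, best) x
          = (depth.insert x d, if best < d then d else best) := by
        simp only [bstDepthAltStep, foldl_predSuccStep_split, ← hp_def, ← hs_def]
        rw [← hd_def]
      have hvals : ∀ p ∈ depth.keys, depth.getD p 0 ∈ depth.values := by
        intro p hp
        rw [PySem.Dict.values_eq_map_keys depth hnd 0]
        exact List.mem_map_of_mem hp
      -- d is positive
      have hdpos : 1 ≤ d := by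
        rw [hd_def]
        have h1 : (0:Int) ≤ (pfold.map (fun v => depth.getD v 0)).getD 0 := by
          cases hq : pfold with
          | none => simp
          | some p =>
              obtain ⟨hpk, _⟩ := (m1 p (hp_def ▸ hq)).resolve_right (by simp)
              have := hpos _ (hvals p hpk)
              simpa using by omega
        omega
      -- if x is already a key, its old depth is below d (its scan successor is x itself)
      have hxd : x ∈ depth.keys → depth.getD x 0 ≤ d := by
        intro hxk
        obtain ⟨q, hq, hqx⟩ := n2 x hxk (le_refl x)
        obtain ⟨_, hxq⟩ := (n1 q hq).resolve_right (by simp)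
        have hqx' : q = x := by omega
        have hsf : sfold = some x := by rw [hs_def, hq, hqx']
        rw [hd_def, hsf]
        simp only [Option.map_some, Option.getD_some]
        have := le_max_right ((pfold.map (fun v => depth.getD v 0)).getD 0) (depth.getD x 0)
        omega
      -- new state facts
      obtain ⟨hsort', hmem'⟩ := insert_keeps_sorted arr x hsort
      simp only [List.foldl_cons, hA, hB]
      refine ih (PySem.List.insert arr ((i : Nat) : Int) x) (depth.insert x d)
        (if best < d then d else best) hsort'
        (PySem.Dict.nodup_keys_insert depth x d hnd) ?_ ?_ ?_
      · intro y
        rw [hmem' y, PySem.Dict.mem_keys_insert]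
        exact or_congr Iff.rfl (hmemiff y)
      · rw [max_values_insert depth x d hnd hxd, ← hbest]
        omega
      · intro v hv
        rcases PySem.Dict.mem_values_insert depth x d v hv with rfl | hv
        · exact hdpos
        · exact hpos v hv

-- ===== VERDICT (by name: the statement is the Claim_ definition above) =====
theorem bstDepth_spec : Claim_equal_bstDepth := by
  intro order _ _hpre
  unfold Spec_bstDepth bstDepth bstDepth_alt
  have h := main_inv order [] PySem.Dict.empty 0
    (by simp) (by simp [PySem.Dict.keys, PySem.Dict.empty])
    (by simp [PySem.Dict.keys, PySem.Dict.empty])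
    (by simp [PySem.Dict.values, PySem.Dict.empty])
    (by simp [PySem.Dict.values, PySem.Dict.empty])
  simpa using h
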